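-- pv_equiv track=rewrite | github.com/davidpirogov/simplistic_personal_budget | data.py | get_categories_from_dataset
-- ===== SOURCE A (Python) =====
-- from typing import List
--
-- def get_categories_from_dataset(dataset: List) -> List[str]:
--     """
--     Gets a set of categories from the dataset by looking at the column named "category"
--     """
--
--     if dataset is None or len(dataset) == 0:
--         return []
--
--     # Loop over the first row (assume that the first row is the CSV header row) and find
--     # the column that is lowercase equal to "category". Increment the index_of_category_column
--     # by 1 each time we move to the next field until we find the name or finish all the columns
--     index_of_category_column = -1
--     header_row: List[str] = dataset[0]
--     for field in header_row:
--         index_of_category_column += 1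
--         if field.lower() == "category":
--             break
--
--     if index_of_category_column == -1:
--         # The above loop looked at all the column headings (assuming that the first row of
--         # the dataset are CSV column headings) and did not find any lowercase strings that
--         # matched 'category', so we cannot continue as this is a logic error
--         return []
--
--     # At this point we know what our category column looks like, so iterate over the whole
--     # dataset and look at only field at the position of the index to add only the unique,
--     # distinct values from the category column.
--     # Because the first row is the CSV heading or column names, start iterating from the 2nd
--     # row which is at index 1, hence dataset[1:]
--     found_categories = []
--     for row in dataset[1:]:
--         if row[index_of_category_column] not in found_categories:
--             found_categories.append(row[index_of_category_column])
--
--     # Sort alphabetically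
--     found_categories.sort()
--
--     return found_categories
-- ===== SOURCE B (Python) =====
-- def get_categories_from_dataset(dataset):
--     """
--     Gets a set of categories from the dataset by looking at the column named "category"
--     """
--     if dataset is None or len(dataset) == 0:
--         return []
--
--     # Same header scan as the original (preserves the last-column fallback and the
--     # empty-header early return).
--     index_of_category_column = -1
--     header_row = dataset[0]
--     for field in header_row:
--         index_of_category_column += 1
--         if field.lower() == "category":
--             break
--
--     if index_of_category_column == -1:
--         return []
--
--     # Sort the column first, then deduplicate in a single adjacent-comparison pass:
--     # no repeated membership scans over the accumulator.
--     out = []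
--     for value in sorted(row[index_of_category_column] for row in dataset[1:]):
--         if not out or out[-1] != value:
--             out.append(value)
--     return out
-- ===== Notes on version B (the rewrite author's own statement) =====
-- stated objective: alternative
-- what changed: A deduplicates with a repeated membership scan over the growing accumulator and sorts at the end; B sorts the category column first and deduplicates in one adjacent-comparison pass.
import Mathlib
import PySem

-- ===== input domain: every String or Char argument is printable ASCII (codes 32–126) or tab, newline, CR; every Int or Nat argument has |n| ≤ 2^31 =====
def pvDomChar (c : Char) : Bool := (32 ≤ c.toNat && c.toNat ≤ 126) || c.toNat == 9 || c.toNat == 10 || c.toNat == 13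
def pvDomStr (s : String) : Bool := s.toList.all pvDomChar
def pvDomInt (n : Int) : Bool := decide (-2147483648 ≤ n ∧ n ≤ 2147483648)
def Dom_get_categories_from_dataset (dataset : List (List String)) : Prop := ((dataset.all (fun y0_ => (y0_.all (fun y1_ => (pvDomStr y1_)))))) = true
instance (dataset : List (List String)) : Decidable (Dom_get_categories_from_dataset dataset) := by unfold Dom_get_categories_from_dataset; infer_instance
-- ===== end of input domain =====

-- B sorts the category column first and deduplicates in one adjacent-comparison pass,
-- instead of A's membership-scan dedup followed by a sort (objective: alternative algorithm).

-- ===== PORT A =====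
-- the header scan: idx starts at -1, is incremented before each comparison, and the loop
-- breaks on the first field whose .lower() equals "category" (shared verbatim by both Pythons)
def pvHeaderIdx : List String → Int → Int
  | [], i => i
  | f :: rest, i => if PySem.Str.lower f = "category" then i + 1 else pvHeaderIdx rest (i + 1)

def get_categories_from_dataset (dataset : List (List String)) : List String :=
  match dataset with
  | [] => []
  | header_row :: rest =>
    let idx := pvHeaderIdx header_row (-1)
    if idx = -1 then []
    else
      let found := rest.foldl (fun acc row =>
        let v := (PySem.List.pyGet? row idx).getD ""   -- row[idx]; total only under Pre_
        if acc.contains v then acc else acc ++ [v]) []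
      PySem.List.sorted found (fun x => x) false

-- ===== PORT B =====
def get_categories_from_dataset_alt (dataset : List (List String)) : List String :=
  match dataset with
  | [] => []
  | header_row :: rest =>
    let idx := pvHeaderIdx header_row (-1)
    if idx = -1 then []
    else
      (PySem.List.sorted (rest.map (fun row => (PySem.List.pyGet? row idx).getD "")) (fun x => x) false).foldl
        (fun out v =>
          match out.getLast? with          -- `not out or out[-1] != value`
          | none => out ++ [v]
          | some w => if w ≠ v then out ++ [v] else out) []

-- ===== PRECONDITION & SPEC =====
-- the column index A's header scan selects, described in closed form: the first field whose
-- .lower() is "category", else the last column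
def pvCatIdx (header_row : List String) : Nat :=
  match header_row.findIdx? (fun f => PySem.Str.lower f = "category") with
  | some i => i
  | none => header_row.length - 1

-- Pre_ excludes exactly the inputs where Python A raises IndexError: a non-empty header with
-- some data row too short for the selected category column (B raises the same error there).
def Pre_get_categories_from_dataset (dataset : List (List String)) : Prop :=
  dataset.head? = some [] ∨ ∀ row ∈ dataset.tail, pvCatIdx (dataset.headD []) < row.length
instance (dataset : List (List String)) : Decidable (Pre_get_categories_from_dataset dataset) := by unfold Pre_get_categories_from_dataset; infer_instance

def pvWitness_get_categories_from_dataset : List (List String) :=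
  [["id", "Category"], ["1", "food"], ["2", "rent"], ["3", "food"]]

def Spec_get_categories_from_dataset (dataset : List (List String)) (out : List String) : Prop := out = get_categories_from_dataset_alt dataset
instance (dataset : List (List String)) (out : List String) : Decidable (Spec_get_categories_from_dataset dataset out) := by unfold Spec_get_categories_from_dataset; infer_instance

-- ===== CLAIM (what is proved, stated in full; the proofs are below) =====
def Claim_equal_get_categories_from_dataset : Prop := ∀ (dataset : List (List String)), Dom_get_categories_from_dataset dataset → Pre_get_categories_from_dataset dataset → Spec_get_categories_from_dataset dataset (get_categories_from_dataset dataset)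

-- ===== LEMMAS AND PROOFS =====

-- B's adjacent-dedup step (the body of port B's foldl, named for the proofs)
def pvStep (out : List String) (v : String) : List String :=
  match out.getLast? with
  | none => out ++ [v]
  | some w => if w ≠ v then out ++ [v] else out

theorem pv_le_getLast_of_pairwise_lt {acc : List String} {a w : String}
    (h : acc.Pairwise (· < ·)) (ha : a ∈ acc) (hw : acc.getLast? = some w) : a ≤ w := by
  induction acc with
  | nil => cases ha
  | cons x t ih =>
    cases t with
    | nil =>
      simp only [List.mem_singleton] at ha
      simp only [List.getLast?_singleton, Option.some.injEq] at hw
      subst ha; subst hw; exact le_refl _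
    | cons y u =>
      rw [List.getLast?_cons_cons] at hw
      rcases List.mem_cons.1 ha with rfl | hmem
      · exact le_of_lt ((List.pairwise_cons.1 h).1 w (List.mem_of_getLast? hw))
      · exact ih (List.pairwise_cons.1 h).2 hmem hw

theorem pvStep_fold (l : List String) : ∀ (acc : List String),
    acc.Pairwise (· < ·) → l.Pairwise (· ≤ ·) → (∀ a ∈ acc, ∀ b ∈ l, a ≤ b) →
    (l.foldl pvStep acc).Pairwise (· < ·) ∧ ∀ x, (x ∈ l.foldl pvStep acc ↔ x ∈ acc ∨ x ∈ l) := by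
  induction l with
  | nil => intro acc hacc _ _; exact ⟨hacc, fun x => by simp⟩
  | cons v rest ih =>
    intro acc hacc hl hcross
    have hl' : rest.Pairwise (· ≤ ·) := (List.pairwise_cons.1 hl).2
    have hvle : ∀ b ∈ rest, v ≤ b := (List.pairwise_cons.1 hl).1
    rw [List.foldl_cons]
    cases hlast : acc.getLast? with
    | none =>
      have haccnil : acc = [] := List.getLast?_eq_none_iff.1 hlast
      subst haccnil
      have hstep : pvStep [] v = [v] := rfl
      rw [hstep]
      obtain ⟨h1, h2⟩ := ih [v] (by simp) hl'
        (by intro a ha b hb; simp only [List.mem_singleton] at ha; subst ha; exact hvle b hb)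
      refine ⟨h1, fun x => ?_⟩
      rw [h2 x]; simp
    | some w =>
      have hwmem : w ∈ acc := List.mem_of_getLast? hlast
      have hwv : w ≤ v := hcross w hwmem v (List.mem_cons_self)
      have hstep : pvStep acc v = if w ≠ v then acc ++ [v] else acc := by
        simp [pvStep, hlast]
      by_cases hne : w = v
      · -- value equals the last kept one: skip it
        rw [hstep, if_neg (by simp [hne])]
        obtain ⟨h1, h2⟩ := ih acc hacc hl'
          (fun a ha b hb => hcross a ha b (List.mem_cons_of_mem _ hb))
        refine ⟨h1, fun x => ?_⟩
        have hvmem : v ∈ acc := hne ▸ hwmem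
        rw [h2 x]
        constructor
        · rintro (hx | hx)
          · exact Or.inl hx
          · exact Or.inr (List.mem_cons_of_mem _ hx)
        · rintro (hx | hx)
          · exact Or.inl hx
          · rcases List.mem_cons.1 hx with rfl | hx'
            · exact Or.inl hvmem
            · exact Or.inr hx'
      · -- a new value: append it
        rw [hstep, if_pos hne]
        have hlt : ∀ a ∈ acc, a < v := by
          intro a ha
          have h1 : a ≤ w := pv_le_getLast_of_pairwise_lt hacc ha hlast
          exact lt_of_le_of_lt h1 (lt_of_le_of_ne hwv hne)
        have hpw : (acc ++ [v]).Pairwise (· < ·) := by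
          rw [List.pairwise_append]
          exact ⟨hacc, by simp, by intro a ha b hb; simp only [List.mem_singleton] at hb; subst hb; exact hlt a ha⟩
        obtain ⟨h1, h2⟩ := ih (acc ++ [v]) hpw hl'
          (by
            intro a ha b hb
            rcases List.mem_append.1 ha with ha' | ha'
            · exact hcross a ha' b (List.mem_cons_of_mem _ hb)
            · simp only [List.mem_singleton] at ha'; subst ha'; exact hvle b hb)
        refine ⟨h1, fun x => ?_⟩
        rw [h2 x]; simp only [List.mem_append, List.mem_cons]
        tauto

theorem pv_main (col : List String) :
    PySem.List.sorted (col.foldl (fun acc v => if acc.contains v then acc else acc ++ [v]) []) (fun x => x) false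
      = (PySem.List.sorted col (fun x => x) false).foldl pvStep [] := by
  have h1 : col.foldl (fun acc v => if acc.contains v then acc else acc ++ [v]) []
      = PySem.Set.ofList col := (PySem.Set.ofList_eq_foldl col).symm
  obtain ⟨hpw, hmem⟩ := pvStep_fold (PySem.List.sorted col (fun x => x) false) []
    (by simp) (PySem.List.sorted_pairwise col (fun x => x)) (by simp)
  have hnodup : ((PySem.List.sorted col (fun x => x) false).foldl pvStep []).Nodup :=
    hpw.imp (fun h => ne_of_lt h)
  have hperm : ((PySem.List.sorted col (fun x => x) false).foldl pvStep []).Perm (PySem.Set.ofList col) := by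
    rw [List.perm_ext_iff_of_nodup hnodup (PySem.Set.nodup_ofList col)]
    intro x
    rw [hmem x, PySem.Set.mem_ofList, PySem.List.mem_sorted]
    simp
  rw [h1]
  apply PySem.List.sorted_eq_of_perm_of_pairwise_lt
  · exact hperm
  · exact hpw

theorem pv_main2 {α : Type} (rows : List α) (f : α → String) :
    PySem.List.sorted (rows.foldl (fun acc row => let v := f row; if acc.contains v then acc else acc ++ [v]) []) (fun x => x) false
      = (PySem.List.sorted (rows.map f) (fun x => x) false).foldl pvStep [] := by
  have h1 : ∀ (acc : List String), rows.foldl (fun acc row => let v := f row; if acc.contains v then acc else acc ++ [v]) acc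
      = (rows.map f).foldl (fun acc v => if acc.contains v then acc else acc ++ [v]) acc := by
    induction rows with
    | nil => intro acc; rfl
    | cons r rs ih => intro acc; rw [List.map_cons, List.foldl_cons, List.foldl_cons]; exact ih _
  rw [h1 []]
  exact pv_main (rows.map f)

-- ===== VERDICT (by name: the statement is the Claim_ definition above) =====
theorem get_categories_from_dataset_spec : Claim_equal_get_categories_from_dataset := by
  intro dataset _ _
  unfold Spec_get_categories_from_dataset get_categories_from_dataset get_categories_from_dataset_alt
  cases dataset with
  | nil => rfl
  | cons header rest =>
    simp only
    split
    · rfl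
    · exact pv_main2 rest (fun row => (PySem.List.pyGet? row (pvHeaderIdx header (-1))).getD "")
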